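-- pv_equiv track=rewrite | github.com/SmileHnu/AudioFab | mcp_chatbot/agent/execution_engine.py | _group_compatible_tasks
-- ===== SOURCE A (Python) =====
-- from typing import Dict, Any, List, Optional
--
-- def _group_compatible_tasks(tool_tasks: List[Dict[str, Any]]) -> List[List[Dict[str, Any]]]:
--     """Group tasks for optimal parallel execution."""
--     # Simple grouping - can be enhanced with dependency analysis
--     memory_intensive = ["Hallo2Tool", "AudioXTool", "DiffRhythmTool", "ACEStepTool"]
--     cpu_intensive = ["TIGERSpeechSeparationTool", "AudioSeparatorTool", "ClearVoiceTool"]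
--
--     groups = []
--     current_group = []
--
--     for task in tool_tasks:
--         tool = task["tool"]
--
--         # Simple heuristic: avoid mixing memory-intensive tools
--         if tool in memory_intensive:
--             if current_group:
--                 groups.append(current_group)
--                 current_group = []
--             groups.append([task])
--         else:
--             current_group.append(task)
--
--     if current_group:
--         groups.append(current_group)
--
--     return groups
-- ===== SOURCE B (Python) =====
-- def _group_compatible_tasks(tool_tasks):
--     """Group tasks for optimal parallel execution (run-scanning re-implementation)."""
--     memory_intensive = ["Hallo2Tool", "AudioXTool", "DiffRhythmTool", "ACEStepTool"]
--
--     groups = []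
--     i = 0
--     n = len(tool_tasks)
--     while i < n:
--         task = tool_tasks[i]
--         i += 1
--         if task["tool"] in memory_intensive:
--             groups.append([task])
--         else:
--             run = [task]
--             while i < n and tool_tasks[i]["tool"] not in memory_intensive:
--                 run.append(tool_tasks[i])
--                 i += 1
--             groups.append(run)
--     return groups
-- ===== Notes on version B (the rewrite author's own statement) =====
-- stated objective: alternative
-- what changed: Replaces A's accumulate-and-flush fold (carry a current_group, flush it before each memory-intensive task and at the end) by a run-scanning loop: at each position either emit the memory-intensive task as a singleton batch or scan forward to collect the whole maximal run of compatible tasks and emit it at once, so no pending-group state or final flush exists.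
import Mathlib
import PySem

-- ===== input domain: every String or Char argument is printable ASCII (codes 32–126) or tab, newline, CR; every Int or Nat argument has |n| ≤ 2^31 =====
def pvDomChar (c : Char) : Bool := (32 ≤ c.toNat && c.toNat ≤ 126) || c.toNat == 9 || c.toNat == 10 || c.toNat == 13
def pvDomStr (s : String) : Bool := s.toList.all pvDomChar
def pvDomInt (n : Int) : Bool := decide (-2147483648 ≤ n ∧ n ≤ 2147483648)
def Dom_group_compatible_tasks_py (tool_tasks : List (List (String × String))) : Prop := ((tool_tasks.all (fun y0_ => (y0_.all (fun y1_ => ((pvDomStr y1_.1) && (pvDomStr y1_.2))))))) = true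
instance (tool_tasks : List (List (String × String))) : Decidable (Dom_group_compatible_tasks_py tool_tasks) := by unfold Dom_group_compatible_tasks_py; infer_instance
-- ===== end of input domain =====

-- B replaces A's accumulate-and-flush fold by a run-scanning loop that emits each maximal
-- compatible run in one step; same return value on every input where A returns (Pre_:
-- every task dict must have a "tool" key, else Python A raises KeyError).

-- ===== PORT A =====
-- task["tool"]: first-match association lookup; Pre_ guarantees the key exists, so the
-- getD default "" is never the looked-up value on admitted inputs.
def pvToolOf (task : List (String × String)) : String :=
  ((PySem.Dict.mk task).get? "tool").getD ""

def pvMemoryIntensive : List String := ["Hallo2Tool", "AudioXTool", "DiffRhythmTool", "ACEStepTool"]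

-- the loop body of A: state = (groups, current_group)
def pvStepA (st : List (List (List (String × String))) × List (List (String × String)))
    (task : List (String × String)) :
    List (List (List (String × String))) × List (List (String × String)) :=
  let tool := pvToolOf task
  if pvMemoryIntensive.contains tool then
    if st.2 ≠ [] then (st.1 ++ [st.2] ++ [[task]], [])
    else (st.1 ++ [[task]], [])
  else (st.1, st.2 ++ [task])

def group_compatible_tasks_py (tool_tasks : List (List (String × String))) : List (List (List (String × String))) :=
  -- cpu_intensive is defined by A but never used; kept as dead binding
  let _cpu_intensive : List String := ["TIGERSpeechSeparationTool", "AudioSeparatorTool", "ClearVoiceTool"]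
  let st := tool_tasks.foldl pvStepA ([], [])
  if st.2 ≠ [] then st.1 ++ [st.2] else st.1

-- ===== PORT B =====
def pvIsMem (task : List (String × String)) : Bool :=
  pvMemoryIntensive.contains (pvToolOf task)

-- B's inner while loop: collect the maximal run of non-memory-intensive tasks
def pvSpanRun : List (List (String × String)) → List (List (String × String)) × List (List (String × String))
  | [] => ([], [])
  | t :: ts =>
    if pvIsMem t then ([], t :: ts)
    else
      let p := pvSpanRun ts
      (t :: p.1, p.2)

theorem pvSpanRun_len (ts : List (List (String × String))) : (pvSpanRun ts).2.length ≤ ts.length := by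
  induction ts with
  | nil => simp [pvSpanRun]
  | cons t ts ih =>
    simp only [pvSpanRun]
    split
    · simp
    · simpa using Nat.le_succ_of_le ih

-- B's outer loop
def group_compatible_tasks_py_alt (tool_tasks : List (List (String × String))) : List (List (List (String × String))) :=
  match tool_tasks with
  | [] => []
  | t :: rest =>
    if pvIsMem t then [t] :: group_compatible_tasks_py_alt rest
    else
      let p := pvSpanRun rest
      (t :: p.1) :: group_compatible_tasks_py_alt p.2
termination_by tool_tasks.length
decreasing_by
  · simp
  · simp; exact pvSpanRun_len rest

-- ===== PRECONDITION & SPEC =====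
-- Pre_ excludes exactly the inputs on which Python A raises KeyError: a task without a "tool" key.
def Pre_group_compatible_tasks_py (tool_tasks : List (List (String × String))) : Prop :=
  ∀ task ∈ tool_tasks, task.any (fun p => p.1 == "tool") = true
instance (tool_tasks : List (List (String × String))) : Decidable (Pre_group_compatible_tasks_py tool_tasks) := by unfold Pre_group_compatible_tasks_py; infer_instance

def pvWitness_group_compatible_tasks_py : (List (List (String × String))) :=
  [[("tool", "Hallo2Tool")], [("tool", "x"), ("k", "v")], [("tool", "y")]]

def Spec_group_compatible_tasks_py (tool_tasks : List (List (String × String))) (out : List (List (List (String × String)))) : Prop := out = group_compatible_tasks_py_alt tool_tasks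
instance (tool_tasks : List (List (String × String))) (out : List (List (List (String × String)))) : Decidable (Spec_group_compatible_tasks_py tool_tasks out) := by unfold Spec_group_compatible_tasks_py; infer_instance

-- ===== CLAIM (what is proved, stated in full; the proofs are below) =====
def Claim_equal_group_compatible_tasks_py : Prop := ∀ (tool_tasks : List (List (String × String))), Dom_group_compatible_tasks_py tool_tasks → Pre_group_compatible_tasks_py tool_tasks → Spec_group_compatible_tasks_py tool_tasks (group_compatible_tasks_py tool_tasks)

-- ===== LEMMAS AND PROOFS =====

-- the "finish" step of A (final flush)
def pvFinish (st : List (List (List (String × String))) × List (List (String × String))) :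
    List (List (List (String × String))) :=
  if st.2 ≠ [] then st.1 ++ [st.2] else st.1

-- key invariant: A's flush-fold, started with pending groups/current, equals B's run batches
theorem pvKey (ts : List (List (String × String)))
    (groups : List (List (List (String × String)))) (cur : List (List (String × String))) :
    pvFinish (ts.foldl pvStepA (groups, cur)) =
      groups ++ (if cur = [] then group_compatible_tasks_py_alt ts
                 else (cur ++ (pvSpanRun ts).1) :: group_compatible_tasks_py_alt (pvSpanRun ts).2) := by
  induction ts generalizing groups cur with
  | nil =>
    by_cases h : cur = [] <;> simp [pvFinish, h, group_compatible_tasks_py_alt, pvSpanRun]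
  | cons t ts ih =>
    by_cases hm : pvIsMem t
    · by_cases h : cur = []
      · rw [List.foldl_cons]
        have hstep : pvStepA (groups, cur) t = (groups ++ [[t]], []) := by
          simp [pvStepA, h, pvIsMem] at hm ⊢; simp [hm]
        rw [hstep, ih]
        simp [h, group_compatible_tasks_py_alt, hm]
      · rw [List.foldl_cons]
        have hstep : pvStepA (groups, cur) t = (groups ++ [cur] ++ [[t]], []) := by
          simp [pvStepA, pvIsMem] at hm ⊢; simp [hm, h]
        rw [hstep, ih]
        simp [h, pvSpanRun, hm, group_compatible_tasks_py_alt]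
    · rw [List.foldl_cons]
      have hstep : pvStepA (groups, cur) t = (groups, cur ++ [t]) := by
        simp [pvStepA, pvIsMem] at hm ⊢; simp [hm]
      rw [hstep, ih]
      have hne : cur ++ [t] ≠ [] := by simp
      by_cases h : cur = []
      · simp [h, group_compatible_tasks_py_alt, hm]
      · simp [h, hne, pvSpanRun, hm]

-- ===== VERDICT (by name: the statement is the Claim_ definition above) =====
theorem group_compatible_tasks_py_spec : Claim_equal_group_compatible_tasks_py := by
  intro tool_tasks _ _
  unfold Spec_group_compatible_tasks_py group_compatible_tasks_py
  have := pvKey tool_tasks [] []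
  simpa [pvFinish] using this
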